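-- pv_equiv track=rewrite | github.com/Manuucho27/PYTHON | RA4/ejerciciosResto/ejercicios.py | clasificar_palabras
-- ===== SOURCE A (Python) =====
-- def clasificar_palabras(texto: str) -> dict:
--     palabras = texto.split()
--     res = {"empiezan_por_vocal": [], "terminan_consonante": [], "contienen_numero": []}
--     for w in palabras:
--         # limpiar signos alrededor
--         w_clean = w.strip(".,;:!?()[]{}\"'\n")
--         if not w_clean:
--             continue
--         # contiene numero
--         if any(ch.isdigit() for ch in w_clean):
--             res["contienen_numero"].append(w_clean)
--         # empieza por vocal
--         if w_clean[0].lower() in "aeiouáéíóú":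
--             res["empiezan_por_vocal"].append(w_clean)
--         # termina en consonante
--         last = w_clean[-1].lower()
--         if last.isalpha() and last not in "aeiouáéíóú":
--             res["terminan_consonante"].append(w_clean)
--     return res
-- ===== SOURCE B (Python) =====
-- def clasificar_palabras(texto: str) -> dict:
--     signos = ".,;:!?()[]{}\"'\n"
--     vocales = "aeiouáéíóú"
--     res = {"empiezan_por_vocal": [], "terminan_consonante": [], "contienen_numero": []}
--
--     def flush(buf):
--         # trim punctuation at both ends of the buffered word
--         while buf and buf[0] in signos:
--             buf.pop(0)
--         while buf and buf[-1] in signos: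
--             buf.pop()
--         if buf:
--             w = "".join(buf)
--             if w[0].lower() in vocales:
--                 res["empiezan_por_vocal"].append(w)
--             last = w[-1].lower()
--             if last.isalpha() and last not in vocales:
--                 res["terminan_consonante"].append(w)
--             if any(ch.isdigit() for ch in w):
--                 res["contienen_numero"].append(w)
--
--     buf = []
--     for ch in texto:
--         if ch.isspace():
--             if buf:
--                 flush(buf)
--                 buf = []
--         else:
--             buf.append(ch)
--     if buf:
--         flush(buf)
--     return res
-- ===== Notes on version B (the rewrite author's own statement) =====
-- stated objective: alternative
-- what changed: A tokenizes with str.split() and then strips and classifies each word; B never calls split or strip: it makes a single character-level scan of the text with an explicit word buffer, trimming punctuation with two pop loops and classifying at each flush.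
import Mathlib
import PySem

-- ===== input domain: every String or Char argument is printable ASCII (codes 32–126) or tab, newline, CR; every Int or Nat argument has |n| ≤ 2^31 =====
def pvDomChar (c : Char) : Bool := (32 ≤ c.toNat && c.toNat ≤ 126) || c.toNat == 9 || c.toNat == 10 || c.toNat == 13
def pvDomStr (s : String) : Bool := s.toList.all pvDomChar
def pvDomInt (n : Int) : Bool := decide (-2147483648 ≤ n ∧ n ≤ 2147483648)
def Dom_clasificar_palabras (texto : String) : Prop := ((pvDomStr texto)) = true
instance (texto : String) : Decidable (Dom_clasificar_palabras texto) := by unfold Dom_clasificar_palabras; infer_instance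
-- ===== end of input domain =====

-- B replaces A's split/strip + per-word loop by a single character-level scan with an explicit
-- word buffer (tokenizing and classifying in one stream pass); objective: alternative (no speed claim).

-- ===== PORT A =====
-- loop body of A's for-loop, as a helper; branch order as in the Python
def pvStepA (res : List String × List String × List String) (w : String) :
    List String × List String × List String :=
  let w_clean := PySem.Str.stripChars w ".,;:!?()[]{}\"'\n"
  if w_clean.toList = [] then res        -- if not w_clean: continue
  else
    -- contiene numero
    let res := if w_clean.toList.any PySem.Chars.isdigit
               then (res.1, res.2.1, res.2.2 ++ [w_clean]) else res
    -- empieza por vocal  (w_clean[0]; nonempty is guaranteed by the guard above)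
    let res := match w_clean.toList with
      | [] => res
      | h :: _ =>
        -- single-char 'in "aeiouáéíóú"' is membership in the vowel chars (exact)
        if "aeiouáéíóú".toList.contains (PySem.Chars.lowerChar h)
        then (res.1 ++ [w_clean], res.2.1, res.2.2) else res
    -- termina en consonante  (w_clean[-1])
    match w_clean.toList.getLast? with
    | none => res
    | some ch =>
      let last := PySem.Chars.lowerChar ch
      if PySem.Chars.isalpha last && !("aeiouáéíóú".toList.contains last)
      then (res.1, res.2.1 ++ [w_clean], res.2.2) else res

def clasificar_palabras (texto : String) : List (String × List String) :=
  let palabras := PySem.Str.split₀ texto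
  let res := palabras.foldl pvStepA ([], [], [])
  [("empiezan_por_vocal", res.1), ("terminan_consonante", res.2.1), ("contienen_numero", res.2.2)]

-- ===== PORT B =====
def pvSig : List Char := ".,;:!?()[]{}\"'\n".toList
def pvVoc : List Char := "aeiouáéíóú".toList

-- Source B's front while-loop: 'while buf and buf[0] in signos: buf.pop(0)'
def pvPopLead : List Char → List Char
  | [] => []
  | c :: t => if pvSig.contains c then pvPopLead t else c :: t

-- Source B's back while-loop: popping buf[-1] repeatedly = the front loop on the reversed buffer (exact)
def pvTrim (buf : List Char) : List Char :=
  (pvPopLead (pvPopLead buf).reverse).reverse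

-- body of Source B's flush after the trim: 'if buf:' then the three checks, in Source B's order
def pvFlushW (res : List String × List String × List String) (w : List Char) :
    List String × List String × List String :=
  match w with
  | [] => res
  | h0 :: _ =>
    let s := String.ofList w                                 -- w = "".join(buf)
    let res := if pvVoc.contains (PySem.Chars.lowerChar h0)
               then (res.1 ++ [s], res.2.1, res.2.2) else res
    let res := match w.getLast? with
      | none => res
      | some ch =>
        let last := PySem.Chars.lowerChar ch
        if PySem.Chars.isalpha last && !(pvVoc.contains last)
        then (res.1, res.2.1 ++ [s], res.2.2) else res
    if w.any PySem.Chars.isdigit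
    then (res.1, res.2.1, res.2.2 ++ [s]) else res

def pvFlush (res : List String × List String × List String) (buf : List Char) :
    List String × List String × List String :=
  pvFlushW res (pvTrim buf)

-- loop body of Source B's 'for ch in texto'
def pvStepB (st : (List String × List String × List String) × List Char) (ch : Char) :
    (List String × List String × List String) × List Char :=
  if PySem.Chars.isspace ch then
    if st.2.isEmpty then st else (pvFlush st.1 st.2, [])
  else (st.1, st.2 ++ [ch])

def clasificar_palabras_alt (texto : String) : List (String × List String) :=
  let st := texto.toList.foldl pvStepB (([], [], []), [])
  let res := if st.2.isEmpty then st.1 else pvFlush st.1 st.2   -- final 'if buf: flush(buf)'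
  [("empiezan_por_vocal", res.1), ("terminan_consonante", res.2.1), ("contienen_numero", res.2.2)]

-- ===== PRECONDITION & SPEC =====
def Spec_clasificar_palabras (texto : String) (out : List (String × List String)) : Prop := out = clasificar_palabras_alt texto
instance (texto : String) (out : List (String × List String)) : Decidable (Spec_clasificar_palabras texto out) := by unfold Spec_clasificar_palabras; infer_instance

-- ===== CLAIM (what is proved, stated in full; the proofs are below) =====
def Claim_equal_clasificar_palabras : Prop := ∀ (texto : String), Dom_clasificar_palabras texto → Spec_clasificar_palabras texto (clasificar_palabras texto)

-- ===== LEMMAS AND PROOFS =====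

-- the front pop-loop is dropWhile
lemma pvPopLead_eq (cs : List Char) : pvPopLead cs = cs.dropWhile (pvSig.contains ·) := by
  induction cs with
  | nil => rfl
  | cons c t ih =>
    rw [List.dropWhile_cons]
    by_cases h : c ∈ pvSig
    · simp [pvPopLead, h, ih]
    · simp [pvPopLead, h]

-- the two trim loops together are Python's strip with that char set
lemma pvTrim_eq (cs : List Char) :
    pvTrim cs = PySem.Chars.stripChars cs ".,;:!?()[]{}\"'\n".toList := by
  simp [pvTrim, pvPopLead_eq, PySem.Chars.stripChars, pvSig]

-- split₀.go's accumulator is the reversed list of words already emitted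
lemma go_acc (cs : List Char) : ∀ cur acc,
    PySem.Chars.split₀.go cs cur acc = acc.reverse ++ PySem.Chars.split₀.go cs cur [] := by
  induction cs with
  | nil =>
    intro cur acc
    simp only [PySem.Chars.split₀.go]
    by_cases h : cur.isEmpty <;> simp [h]
  | cons c t ih =>
    intro cur acc
    simp only [PySem.Chars.split₀.go]
    by_cases hs : PySem.Chars.isspace c
    · by_cases h : cur.isEmpty
      · simp only [hs, h, if_true]
        rw [ih [] acc]
      · simp only [hs, h, if_true, Bool.false_eq_true, ite_false]
        rw [ih [] (cur.reverse :: acc), ih [] [cur.reverse]]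
        simp
    · simp only [hs, Bool.false_eq_true, ite_false]
      exact ih _ _

-- B's character scan (plus final flush) = flushing each word that split₀'s tokenizer emits
lemma scan_eq (cs : List Char) : ∀ (cur : List Char) res,
    (let st := cs.foldl pvStepB (res, cur);
     if st.2.isEmpty then st.1 else pvFlush st.1 st.2)
    = (PySem.Chars.split₀.go cs cur.reverse []).foldl pvFlush res := by
  induction cs with
  | nil =>
    intro cur res
    simp only [List.foldl_nil, PySem.Chars.split₀.go, List.isEmpty_reverse]
    by_cases h : cur.isEmpty
    · simp [h]
    · simp [h, List.reverse_reverse]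
  | cons c t ih =>
    intro cur res
    simp only [List.foldl_cons, PySem.Chars.split₀.go, pvStepB, List.isEmpty_reverse]
    by_cases hs : PySem.Chars.isspace c
    · by_cases h : cur.isEmpty
      · have hc : cur = [] := List.isEmpty_iff.mp h
        simp only [hs, h, if_true]
        have := ih [] res
        simpa [hc] using this
      · simp only [hs, h, if_true, Bool.false_eq_true, ite_false]
        rw [go_acc t [] [cur.reverse.reverse], List.foldl_append]
        have := ih [] (pvFlush res cur)
        simpa [List.reverse_reverse] using this
    · simp only [hs, Bool.false_eq_true, ite_false]
      have := ih (cur ++ [c]) res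
      simpa [List.reverse_append] using this

-- one A-step on a word equals one B-flush on its character list
set_option maxHeartbeats 1000000 in
lemma stepA_eq_flush (res : List String × List String × List String) (l : List Char) :
    pvStepA res (String.ofList l) = pvFlush res l := by
  simp only [pvStepA, pvFlush, pvTrim_eq]
  have hst : PySem.Str.stripChars (String.ofList l) ".,;:!?()[]{}\"'\n"
      = String.ofList (PySem.Chars.stripChars l ".,;:!?()[]{}\"'\n".toList) := by
    simp [PySem.Str.stripChars]
  rw [hst]
  generalize PySem.Chars.stripChars l ".,;:!?()[]{}\"'\n".toList = s
  cases s with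
  | nil => simp [pvFlushW]
  | cons h0 t =>
    cases hl : (h0 :: t).getLast? with
    | none => simp at hl
    | some ch =>
      simp only [pvFlushW, String.toList_ofList, pvVoc, hl, reduceCtorEq, ite_false]
      by_cases hd : (h0 :: t).any PySem.Chars.isdigit = true <;>
      by_cases hv : "aeiouáéíóú".toList.contains (PySem.Chars.lowerChar h0) = true <;>
      by_cases hc : (PySem.Chars.isalpha (PySem.Chars.lowerChar ch) &&
          !("aeiouáéíóú".toList.contains (PySem.Chars.lowerChar ch))) = true <;>
      simp only [hd, hv, hc, ite_true, ite_false, if_true, if_false,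
        Bool.false_eq_true, List.append_nil]

-- A's fold over the split words equals B's flush fold over their character lists
lemma foldA_eq_foldFlush (l : List (List Char)) : ∀ res,
    (l.map String.ofList).foldl pvStepA res = l.foldl pvFlush res := by
  induction l with
  | nil => intro res; rfl
  | cons w t ih =>
    intro res
    simp only [List.map_cons, List.foldl_cons, stepA_eq_flush]
    exact ih _

-- ===== VERDICT (by name: the statement is the Claim_ definition above) =====
theorem clasificar_palabras_spec : Claim_equal_clasificar_palabras := by
  intro texto _
  unfold Spec_clasificar_palabras clasificar_palabras clasificar_palabras_alt
  have hsplit : PySem.Str.split₀ texto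
      = (PySem.Chars.split₀ texto.toList).map String.ofList := rfl
  rw [hsplit]
  have hfold := foldA_eq_foldFlush (PySem.Chars.split₀ texto.toList) ([], [], [])
  have hscan := scan_eq texto.toList [] ([], [], [])
  simp only [List.reverse_nil] at hscan
  simp only [hfold, PySem.Chars.split₀] at *
  rw [hscan]
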